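-- pv_equiv track=rewrite | github.com/diofant/diofant | diofant/core/logic.py | _fuzzy_group
-- ===== SOURCE A (Python) =====
-- def _fuzzy_group(args, quick_exit=False):
--     """
--     Return True if all args are True, None if there is any None else False
--     unless ``quick_exit`` is True (then return None as soon as a second False
--     is seen.
--
--      ``_fuzzy_group`` is like ``fuzzy_and`` except that it is more
--     conservative in returning a False, waiting to make sure that all
--     arguments are True or False and returning None if any arguments are
--     None. It also has the capability of permiting only a single False and
--     returning None if more than one is seen. For example, the presence of a
--     single transcendental amongst rationals would indicate that the group is
--     no longer rational; but a second transcendental in the group would make the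
--     determination impossible.
--
--     Examples
--     ========
--
--     By default, multiple Falses mean the group is broken:
--
--     >>> _fuzzy_group([False, False, True])
--     False
--
--     If multiple Falses mean the group status is unknown then set
--     `quick_exit` to True so None can be returned when the 2nd False is seen:
--
--     >>> _fuzzy_group([False, False, True], quick_exit=True)
--
--     But if only a single False is seen then the group is known to
--     be broken:
--
--     >>> _fuzzy_group([False, True, True], quick_exit=True)
--     False
--
--     """
--     saw_other = False
--     for a in args:
--         if a is True:
--             continue
--         if a is None:
--             return
--         if quick_exit and saw_other:
--             return
--         saw_other = True
--     return not saw_other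
-- ===== SOURCE B (Python) =====
-- def _fuzzy_group(args, quick_exit=False):
--     args = list(args)
--     if any(a is None for a in args):
--         return None
--     others = [a for a in args if a is not True]
--     if quick_exit and len(others) > 1:
--         return None
--     return not others
-- ===== Notes on version B (the rewrite author's own statement) =====
-- stated objective: simpler
-- what changed: Replaces the single early-exiting flag loop with a two-phase shape: a None-presence check, then a filtered list of non-True args decided by its length/emptiness.
import Mathlib
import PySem

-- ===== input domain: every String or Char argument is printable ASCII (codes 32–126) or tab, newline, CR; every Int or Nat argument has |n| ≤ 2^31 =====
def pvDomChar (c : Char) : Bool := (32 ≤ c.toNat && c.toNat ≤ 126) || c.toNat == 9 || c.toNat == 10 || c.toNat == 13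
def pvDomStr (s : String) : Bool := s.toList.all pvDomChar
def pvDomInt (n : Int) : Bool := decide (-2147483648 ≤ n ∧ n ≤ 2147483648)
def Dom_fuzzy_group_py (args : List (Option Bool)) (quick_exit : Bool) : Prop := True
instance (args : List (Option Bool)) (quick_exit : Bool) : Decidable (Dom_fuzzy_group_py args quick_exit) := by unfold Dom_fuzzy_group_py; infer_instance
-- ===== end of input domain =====

-- ===== PORT A =====
-- A: early-exiting loop carrying a saw_other flag
def fuzzyGroupLoop (quick_exit : Bool) (saw_other : Bool) : List (Option Bool) → Option Bool
  | [] => some (!saw_other)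
  | a :: rest =>
    if a = some true then fuzzyGroupLoop quick_exit saw_other rest
    else if a = none then none
    else if quick_exit && saw_other then none
    else fuzzyGroupLoop quick_exit true rest

def fuzzy_group_py (args : List (Option Bool)) (quick_exit : Bool) : Option Bool :=
  fuzzyGroupLoop quick_exit false args

-- ===== PORT B =====
-- B (simpler decomposition): None-check, then filter non-True args and decide by size/emptiness
def fuzzy_group_py_alt (args : List (Option Bool)) (quick_exit : Bool) : Option Bool :=
  if args.any (fun a => a = none) then none
  else
    let others := args.filter (fun a => a ≠ some true)
    if quick_exit && others.length > 1 then none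
    else some others.isEmpty

-- ===== PRECONDITION & SPEC =====
def Spec_fuzzy_group_py (args : List (Option Bool)) (quick_exit : Bool) (out : Option Bool) : Prop := out = fuzzy_group_py_alt args quick_exit
instance (args : List (Option Bool)) (quick_exit : Bool) (out : Option Bool) : Decidable (Spec_fuzzy_group_py args quick_exit out) := by unfold Spec_fuzzy_group_py; infer_instance

-- ===== CLAIM (what is proved, stated in full; the proofs are below) =====
def Claim_equal_fuzzy_group_py : Prop := ∀ (args : List (Option Bool)) (quick_exit : Bool), Dom_fuzzy_group_py args quick_exit → Spec_fuzzy_group_py args quick_exit (fuzzy_group_py args quick_exit)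

-- ===== LEMMAS AND PROOFS =====

-- ===== VERDICT (by name: the statement is the Claim_ definition above) =====
theorem fuzzyGroupLoop_eq (q : Bool) (args : List (Option Bool)) : ∀ saw : Bool,
    fuzzyGroupLoop q saw args =
      if args.any (fun a => a = none) then none
      else
        let k := (args.filter (fun a => a ≠ some true)).length
        if q && decide (k + (if saw then 1 else 0) > 1) then none
        else some (decide (k = 0) && !saw) := by
  induction args with
  | nil => intro saw; cases saw <;> simp [fuzzyGroupLoop]
  | cons a rest ih =>
    intro saw
    match a with
    | some true => simpa [fuzzyGroupLoop] using ih saw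
    | none => simp [fuzzyGroupLoop]
    | some false =>
      simp only [fuzzyGroupLoop]
      by_cases hq : q = true
      · subst hq
        cases saw with
        | true => simp
        | false =>
          rw [ih true]
          simp only [List.any_cons, List.filter_cons]
          by_cases hn : rest.any (fun a => a = none) = true
          · simp [hn]
          · simp only [hn]
            simp only [reduceCtorEq]
            split <;> split <;> simp_all <;> omega
      · have hq' : q = false := by simpa using hq
        subst hq'
        rw [ih true]
        simp

theorem fuzzy_group_py_spec : Claim_equal_fuzzy_group_py := by
  intro args q _
  unfold Spec_fuzzy_group_py fuzzy_group_py fuzzy_group_py_alt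
  rw [fuzzyGroupLoop_eq]
  split
  · rfl
  · show (if (q && decide (((List.filter (fun a => decide (a ≠ some true)) args).length + if false = true then 1 else 0) > 1)) = true then none
        else some (decide ((List.filter (fun a => decide (a ≠ some true)) args).length = 0) && !false)) =
      (if (q && decide ((List.filter (fun a => decide (a ≠ some true)) args).length > 1)) = true then none
        else some (List.filter (fun a => decide (a ≠ some true)) args).isEmpty)
    simp only [Bool.false_eq_true, if_false, Nat.add_zero, Bool.not_false, Bool.and_true,
      List.isEmpty_iff_length_eq_zero]
    split
    · rfl
    · generalize List.filter (fun a => decide (a ≠ some true)) args = l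
      cases l <;> simp
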